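-- pv_equiv track=rewrite | github.com/dg1223/data-structures-and-algorithms | problem-solving/patterns_31.py | pattern31
-- ===== SOURCE A (Python) =====
-- def pattern31(n):
--     pattern = ''
--     original_n = n
--     # we get 81 items from the following n -> 9^2
--     # n = 2*n
--     # we need 49 items for the solution, -> 7^2
--     n = 2*n-2
--     for row in range(n+1):
--         for col in range(n+1):
--             # print this pattern to understand the logic first
--             # atEveryIndex = min(min(row, col), min(n-row, n-col))
--
--             # print this pattern to get the inverted solution to above
--             atEveryIndex = original_n - min(min(row, col), min(n-row, n-col))
--
--             # This is the solution
--             atEveryIndex = original_n - min(min(row, col), min(n-row, n-col))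
--
--             pattern += str(atEveryIndex) + ' '
--
--         pattern += '\n'
--     return pattern
-- ===== SOURCE B (Python) =====
-- def pattern31(n):
--     # Exploit the four-fold symmetry: compute only the top-left n x n quadrant
--     # (value n - min(r, c)) and mirror it horizontally and vertically.
--     rows = []
--     for r in range(n):
--         left = [str(n - min(r, c)) for c in range(n)]
--         vals = left + list(reversed(left[:-1]))
--         rows.append(''.join(v + ' ' for v in vals) + '\n')
--     return ''.join(rows + list(reversed(rows[:-1])))
-- ===== Notes on version B (the rewrite author's own statement) =====
-- stated objective: faster
-- what changed: B computes only the top-left n x n quadrant of the grid (value n - min(r,c)) and builds the full picture by mirroring each row and the row list with joins, instead of A's cell-by-cell double loop over the whole (2n-1)x(2n-1) grid appending to one growing string.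
import Mathlib
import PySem

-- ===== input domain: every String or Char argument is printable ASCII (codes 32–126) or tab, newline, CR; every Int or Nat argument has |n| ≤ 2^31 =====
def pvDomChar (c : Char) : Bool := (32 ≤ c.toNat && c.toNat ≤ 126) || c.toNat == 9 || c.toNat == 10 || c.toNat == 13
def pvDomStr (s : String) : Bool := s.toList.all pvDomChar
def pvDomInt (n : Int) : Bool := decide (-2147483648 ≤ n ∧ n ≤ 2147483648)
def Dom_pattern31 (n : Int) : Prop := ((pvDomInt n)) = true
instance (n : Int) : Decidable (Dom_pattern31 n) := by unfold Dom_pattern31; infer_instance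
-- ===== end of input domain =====

-- B replaces A's cell-by-cell double loop over the whole (2n-1)x(2n-1) grid by computing
-- only the top-left n x n quadrant (value n - min(r,c)) and mirroring each row and the
-- row list, joining pieces instead of appending cell-by-cell; objective: faster (constant factor, measured).

-- ===== PORT A =====
def pattern31 (n : Int) : String :=
  (PySem.List.pyRange 0 (2 * n - 2 + 1) 1).foldl
    (fun pattern row =>
      ((PySem.List.pyRange 0 (2 * n - 2 + 1) 1).foldl
        (fun pattern col =>
          pattern ++ (PySem.Int.toStr
            (n - min (min row col) (min ((2 * n - 2) - row) ((2 * n - 2) - col))) ++ " "))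
        pattern) ++ "\n")
    ""

-- ===== PORT B =====
def pattern31_alt (n : Int) : String :=
  let rows := (PySem.List.pyRange 0 n 1).map (fun r =>
    let left := (PySem.List.pyRange 0 n 1).map (fun c => PySem.Int.toStr (n - min r c))
    let vals := left ++ (PySem.List.slice left none (some (-1))).reverse
    String.join (vals.map (fun v => v ++ " ")) ++ "\n")
  String.join (rows ++ (PySem.List.slice rows none (some (-1))).reverse)

-- ===== PRECONDITION & SPEC =====
def Spec_pattern31 (n : Int) (out : String) : Prop := out = pattern31_alt n
instance (n : Int) (out : String) : Decidable (Spec_pattern31 n out) := by unfold Spec_pattern31; infer_instance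

-- ===== CLAIM (what is proved, stated in full; the proofs are below) =====
def Claim_equal_pattern31 : Prop := ∀ (n : Int), Dom_pattern31 n → Spec_pattern31 n (pattern31 n)

-- ===== LEMMAS AND PROOFS =====

-- the cell string for 4-way-min value d, and one full (mirrored) row for quadrant row dr
def pvCellF (n : Int) (d : Nat) : String := PySem.Int.toStr (n - (d : Int)) ++ " "
def pvRowF (n : Int) (N : Nat) (dr : Nat) : String :=
  String.join ((List.range N).map (fun c => pvCellF n (min dr c)) ++
    ((List.range (N - 1)).map (fun c => pvCellF n (min dr c))).reverse) ++ "\n"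

theorem pv_foldl_append_str (xs : List String) (s : String) :
    xs.foldl (· ++ ·) s = s ++ String.join xs := by
  induction xs generalizing s with
  | nil => simp [String.join]
  | cons x xs ih =>
    have hj : String.join (x :: xs) = x ++ String.join xs := by
      show xs.foldl (· ++ ·) ("" ++ x) = _
      rw [String.empty_append, ih]
    show xs.foldl (· ++ ·) (s ++ x) = s ++ String.join (x :: xs)
    rw [ih, hj, String.append_assoc]

theorem pv_strfold {α : Type} (g : α → String) (xs : List α) (s : String) :
    xs.foldl (fun a x => a ++ g x) s = s ++ String.join (xs.map g) := by
  rw [← List.foldl_map, pv_foldl_append_str]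

theorem pv_double (g : Int → Int → String) (xs ys : List Int) :
    xs.foldl (fun pattern row => (ys.foldl (fun p col => p ++ g row col) pattern) ++ "\n") "" =
      String.join (xs.map (fun row => String.join (ys.map (g row)) ++ "\n")) := by
  have h : (fun (pattern : String) (row : Int) =>
        (ys.foldl (fun p col => p ++ g row col) pattern) ++ "\n")
      = fun (pattern : String) (row : Int) =>
        pattern ++ (String.join (ys.map (g row)) ++ "\n") := by
    funext p r
    rw [pv_strfold, String.append_assoc]
  rw [h, pv_strfold, String.empty_append]

theorem pv_map_range_reverse {α : Type} (f : Nat → α) (M : Nat) :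
    ((List.range M).map f).reverse = (List.range M).map (fun k => f (M - 1 - k)) := by
  apply List.ext_getElem
  · simp
  · intro k h1 h2
    simp [List.getElem_reverse]

theorem pv_dropLast_map_range {α : Type} (f : Nat → α) (M : Nat) :
    ((List.range M).map f).dropLast = (List.range (M - 1)).map f := by
  cases M with
  | zero => simp
  | succ m => simp [List.range_succ]

theorem pv_pal {α : Type} (f : Nat → α) (N : Nat) (h : 1 ≤ N) :
    (List.range (2 * N - 1)).map (fun c => f (min c (2 * N - 2 - c))) =
      (List.range N).map f ++ ((List.range (N - 1)).map f).reverse := by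
  have h2 : 2 * N - 1 = N + (N - 1) := by omega
  rw [h2, List.range_add, List.map_append, pv_map_range_reverse, List.map_map]
  congr 1
  · exact List.map_congr_left (fun c hc => by
      have : c < N := List.mem_range.mp hc
      congr 1
      omega)
  · exact List.map_congr_left (fun k hk => by
      have : k < N - 1 := List.mem_range.mp hk
      simp only [Function.comp]
      congr 1
      omega)

theorem pv_pyRange_cast (M : Nat) :
    PySem.List.pyRange 0 (M : Int) 1 = (List.range M).map (fun k => Int.ofNat k) := by
  rw [PySem.List.pyRange_one, show (((M : Int)) - 0).toNat = M by omega]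
  exact List.map_congr_left (fun k _ => by simp)

theorem pattern31_eq (N : Nat) (hN : 1 ≤ N) :
    pattern31 (N : Int) = String.join ((List.range N).map (pvRowF (N : Int) N) ++
      ((List.range (N - 1)).map (pvRowF (N : Int) N)).reverse) := by
  unfold pattern31
  rw [show 2 * (N : Int) - 2 + 1 = ((2 * N - 1 : Nat) : Int) by omega, pv_pyRange_cast,
    pv_double (fun row col => PySem.Int.toStr
      ((N : Int) - min (min row col) (min ((2 * (N : Int) - 2) - row) ((2 * (N : Int) - 2) - col))) ++ " ")]
  congr 1
  rw [List.map_map]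
  have hrow : ∀ r ∈ List.range (2 * N - 1),
      (String.join (((List.range (2 * N - 1)).map (fun k => Int.ofNat k)).map
        (fun col => PySem.Int.toStr ((N : Int) - min (min ((r : Nat) : Int) col)
          (min ((2 * (N : Int) - 2) - (r : Nat)) ((2 * (N : Int) - 2) - col))) ++ " ")) ++ "\n")
      = pvRowF (N : Int) N (min r (2 * N - 2 - r)) := by
    intro r hrm
    have hrlt : r < 2 * N - 1 := List.mem_range.mp hrm
    unfold pvRowF
    congr 1
    rw [List.map_map]
    have hcells : (List.range (2 * N - 1)).map
        ((fun col => PySem.Int.toStr ((N : Int) - min (min ((r : Nat) : Int) col)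
          (min ((2 * (N : Int) - 2) - (r : Nat)) ((2 * (N : Int) - 2) - col))) ++ " ") ∘ (fun k => Int.ofNat k))
        = (List.range (2 * N - 1)).map
          (fun c => pvCellF (N : Int) (min (min r (2 * N - 2 - r)) (min c (2 * N - 2 - c)))) := by
      refine List.map_congr_left (fun c hc => ?_)
      have hclt : c < 2 * N - 1 := List.mem_range.mp hc
      simp only [Function.comp]
      unfold pvCellF
      congr 2
      simp only [Int.ofNat_eq_natCast]
      omega
    rw [hcells]
    have hp := pv_pal (fun dc => pvCellF (N : Int) (min (min r (2 * N - 2 - r)) dc)) N hN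
    simp only at hp
    rw [hp]
  rw [List.map_congr_left (fun r hrm => by
    simp only [Function.comp]
    exact hrow r hrm)]
  exact pv_pal (pvRowF (N : Int) N) N hN

theorem pattern31_alt_eq (N : Nat) :
    pattern31_alt (N : Int) = String.join ((List.range N).map (pvRowF (N : Int) N) ++
      ((List.range (N - 1)).map (pvRowF (N : Int) N)).reverse) := by
  unfold pattern31_alt
  simp only [pv_pyRange_cast, List.map_map]
  have hrow : ∀ r ∈ List.range N,
      (String.join ((((List.range N).map ((fun c => PySem.Int.toStr ((N : Int) - min ((r : Nat) : Int) c)) ∘ (fun k => Int.ofNat k)))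
          ++ (PySem.List.slice ((List.range N).map ((fun c => PySem.Int.toStr ((N : Int) - min ((r : Nat) : Int) c)) ∘ (fun k => Int.ofNat k))) none (some (-1))).reverse).map
          (fun v => v ++ " ")) ++ "\n")
      = pvRowF (N : Int) N r := by
    intro r _
    have hleft : (List.range N).map ((fun c => PySem.Int.toStr ((N : Int) - min ((r : Nat) : Int) c)) ∘ (fun k => Int.ofNat k))
        = (List.range N).map (fun c => PySem.Int.toStr ((N : Int) - ((min r c : Nat) : Int))) := by
      refine List.map_congr_left (fun c _ => ?_)
      simp only [Function.comp]
      congr 1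
      simp only [Int.ofNat_eq_natCast]
      omega
    rw [hleft, PySem.List.slice_to_neg_one, pv_dropLast_map_range]
    unfold pvRowF pvCellF
    rw [List.map_append, List.map_reverse, List.map_map, List.map_map]
    rfl
  rw [List.map_congr_left (fun r hrm => by
    simp only [Function.comp]
    exact hrow r hrm)]
  rw [PySem.List.slice_to_neg_one, pv_dropLast_map_range]

-- ===== VERDICT (by name: the statement is the Claim_ definition above) =====
theorem pattern31_spec : Claim_equal_pattern31 := by
  intro n _
  unfold Spec_pattern31
  by_cases hn : n ≤ 0
  · have h1 : PySem.List.pyRange 0 (2 * n - 2 + 1) 1 = [] :=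
      PySem.List.pyRange_one_eq_nil (by omega)
    have h2 : PySem.List.pyRange 0 n 1 = [] :=
      PySem.List.pyRange_one_eq_nil (by omega)
    simp [pattern31, pattern31_alt, h1, h2, String.join, PySem.List.slice]
  · obtain ⟨N, hN⟩ : ∃ N : Nat, n = (N : Int) := ⟨n.toNat, by omega⟩
    subst hN
    have hN1 : 1 ≤ N := by omega
    rw [pattern31_eq N hN1, pattern31_alt_eq N]
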